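-- pv_equiv track=rewrite | github.com/nginfra/movici-simulation-core | movici_simulation_core/data_tracker/index.py | query_idx
-- ===== SOURCE A (Python) =====
-- def query_idx(block_from, block_to, block_offset, ident):
--     for begin, end, offset in zip(block_from, block_to, block_offset):
--         if ident < begin:
--             break
--         if end < ident:
--             continue
--         return ident - begin + offset
--     return -1
-- ===== SOURCE B (Python) =====
-- def query_idx(block_from, block_to, block_offset, ident):
--     """Recursive formulation: look at the first block; stop at a block starting
--     past ident, answer from a block containing it, otherwise recurse on the tails."""
--     if not (block_from and block_to and block_offset) or ident < block_from[0]: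
--         return -1
--     if ident <= block_to[0]:
--         return ident - block_from[0] + block_offset[0]
--     return query_idx(block_from[1:], block_to[1:], block_offset[1:], ident)
-- ===== Notes on version B (the rewrite author's own statement) =====
-- stated objective: alternative
-- what changed: Replaces the imperative zip loop with break/continue/early-return by a head/tail recursion over the three lists directly (no zipping, no loop control flow).
import Mathlib
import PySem

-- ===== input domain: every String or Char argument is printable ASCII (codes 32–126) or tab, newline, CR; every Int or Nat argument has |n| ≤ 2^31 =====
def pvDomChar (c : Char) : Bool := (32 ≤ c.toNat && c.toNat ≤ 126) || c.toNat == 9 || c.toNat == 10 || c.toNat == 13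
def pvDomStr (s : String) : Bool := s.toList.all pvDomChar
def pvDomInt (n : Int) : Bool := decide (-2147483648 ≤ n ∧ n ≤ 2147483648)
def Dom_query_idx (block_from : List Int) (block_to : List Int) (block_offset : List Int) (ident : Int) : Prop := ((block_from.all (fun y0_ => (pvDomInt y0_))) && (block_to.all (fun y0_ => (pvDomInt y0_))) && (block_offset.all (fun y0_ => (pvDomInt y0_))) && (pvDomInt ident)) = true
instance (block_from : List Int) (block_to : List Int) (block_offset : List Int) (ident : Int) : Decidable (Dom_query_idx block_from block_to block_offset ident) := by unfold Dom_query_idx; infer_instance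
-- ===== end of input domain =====

-- B restates A's zip loop as a head/tail recursion over the three lists; same O(n) cost, equivalence proved.
-- ===== PORT A =====
-- the for-loop over zip(block_from, block_to, block_offset), with break/continue/return
def queryA_loop (ident : Int) : List ((Int × Int) × Int) → Int
  | [] => -1
  | ((begin_, end_), offset) :: rest =>
    if ident < begin_ then -1
    else if end_ < ident then queryA_loop ident rest
    else ident - begin_ + offset

def query_idx (block_from : List Int) (block_to : List Int) (block_offset : List Int) (ident : Int) : Int :=
  queryA_loop ident ((block_from.zip block_to).zip block_offset)

-- ===== PORT B =====
def query_idx_alt (block_from : List Int) (block_to : List Int) (block_offset : List Int) (ident : Int) : Int :=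
  match block_from, block_to, block_offset with
  | b :: bf, e :: bt, o :: bo =>
    if ident < b then -1
    else if ident ≤ e then ident - b + o
    else query_idx_alt bf bt bo ident
  | _, _, _ => -1

-- ===== PRECONDITION & SPEC =====
def Spec_query_idx (block_from : List Int) (block_to : List Int) (block_offset : List Int) (ident : Int) (out : Int) : Prop := out = query_idx_alt block_from block_to block_offset ident
instance (block_from : List Int) (block_to : List Int) (block_offset : List Int) (ident : Int) (out : Int) : Decidable (Spec_query_idx block_from block_to block_offset ident out) := by unfold Spec_query_idx; infer_instance

-- ===== CLAIM (what is proved, stated in full; the proofs are below) =====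
def Claim_equal_query_idx : Prop := ∀ (block_from : List Int) (block_to : List Int) (block_offset : List Int) (ident : Int), Dom_query_idx block_from block_to block_offset ident → Spec_query_idx block_from block_to block_offset ident (query_idx block_from block_to block_offset ident)

-- ===== LEMMAS AND PROOFS =====

-- ===== VERDICT (by name: the statement is the Claim_ definition above) =====
theorem queryA_loop_eq_alt (bf bt bo : List Int) (ident : Int) :
    queryA_loop ident ((bf.zip bt).zip bo) = query_idx_alt bf bt bo ident := by
  induction bf generalizing bt bo with
  | nil => cases bt <;> cases bo <;> rfl
  | cons b bf ih =>
    cases bt with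
    | nil => cases bo <;> rfl
    | cons e bt =>
      cases bo with
      | nil => rfl
      | cons o bo =>
        simp only [List.zip_cons_cons, queryA_loop, query_idx_alt, ih]
        by_cases h1 : ident < b
        · simp [h1]
        · by_cases h2 : e < ident
          · simp [h1, h2, not_le.mpr h2]
          · simp [h1, h2, not_lt.mp h2]

theorem query_idx_spec : Claim_equal_query_idx := by
  intro bf bt bo ident _
  unfold Spec_query_idx query_idx
  exact queryA_loop_eq_alt bf bt bo ident
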